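-- pv_equiv track=rewrite | github.com/Parth1743/Link-Legacy_Game | Main.py | check_consecutive_sequence
-- ===== SOURCE A (Python) =====
-- def check_consecutive_sequence(sequence, stand_colors, color):
--     count = 0
--     for stand in sequence:
--         if stand_colors[stand] == color:
--             count += 1
--         else:
--             count = 0
--     return count >= 3
-- ===== SOURCE B (Python) =====
-- def check_consecutive_sequence(sequence, stand_colors, color):
--     last_three = sequence[-3:]
--     return len(last_three) == 3 and all(stand_colors[s] == color for s in last_three)
-- ===== Notes on version B (the rewrite author's own statement) =====
-- stated objective: simpler
-- what changed: A's counter resets on every mismatch and is only read after the loop, so the result is exactly 'the last three stands all have the color'; B checks the final slice sequence[-3:] directly with a closed-form test instead of the accumulate-and-reset scan.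
import Mathlib
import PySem

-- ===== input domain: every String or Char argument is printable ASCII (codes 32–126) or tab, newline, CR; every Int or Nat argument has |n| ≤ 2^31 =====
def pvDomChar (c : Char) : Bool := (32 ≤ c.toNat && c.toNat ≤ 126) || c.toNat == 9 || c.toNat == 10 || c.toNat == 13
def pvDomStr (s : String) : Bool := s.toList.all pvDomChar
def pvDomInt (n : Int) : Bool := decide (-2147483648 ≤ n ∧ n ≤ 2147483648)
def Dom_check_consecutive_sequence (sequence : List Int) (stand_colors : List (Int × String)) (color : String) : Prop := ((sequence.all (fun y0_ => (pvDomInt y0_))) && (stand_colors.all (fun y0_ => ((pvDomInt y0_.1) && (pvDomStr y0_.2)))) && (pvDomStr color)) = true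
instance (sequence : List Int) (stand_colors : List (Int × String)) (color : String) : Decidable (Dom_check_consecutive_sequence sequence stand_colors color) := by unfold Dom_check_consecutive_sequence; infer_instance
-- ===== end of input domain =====

-- B replaces A's accumulate-and-reset scan by a direct closed-form check of the last three elements (simpler).


-- ===== PORT A =====
-- stand_colors[stand]: first-match association lookup; a missing key is a Python KeyError,
-- excluded by Pre_ below (there the port's '== some color' is simply false).
def check_consecutive_sequence (sequence : List Int) (stand_colors : List (Int × String)) (color : String) : Bool :=
  decide (3 ≤ sequence.foldl (fun count stand => if stand_colors.lookup stand == some color then count + 1 else (0 : Int)) 0)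

-- ===== PORT B =====
def check_consecutive_sequence_alt (sequence : List Int) (stand_colors : List (Int × String)) (color : String) : Bool :=
  let last_three := PySem.List.slice sequence (some (-3)) none
  decide (last_three.length = 3) && last_three.all (fun s => stand_colors.lookup s == some color)

-- ===== PRECONDITION & SPEC =====
-- Pre_ excludes exactly the inputs where Python A raises KeyError: a stand of the sequence missing from stand_colors.
def Pre_check_consecutive_sequence (sequence : List Int) (stand_colors : List (Int × String)) (color : String) : Prop :=
  ∀ s ∈ sequence, (stand_colors.lookup s).isSome
instance (sequence : List Int) (stand_colors : List (Int × String)) (color : String) : Decidable (Pre_check_consecutive_sequence sequence stand_colors color) := by unfold Pre_check_consecutive_sequence; infer_instance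
def pvWitness_check_consecutive_sequence : List Int × (List (Int × String)) × String := ([1, 2, 1], [(1, "red"), (2, "red")], "red")

def Spec_check_consecutive_sequence (sequence : List Int) (stand_colors : List (Int × String)) (color : String) (out : Bool) : Prop := out = check_consecutive_sequence_alt sequence stand_colors color
instance (sequence : List Int) (stand_colors : List (Int × String)) (color : String) (out : Bool) : Decidable (Spec_check_consecutive_sequence sequence stand_colors color out) := by unfold Spec_check_consecutive_sequence; infer_instance

-- ===== CLAIM (what is proved, stated in full; the proofs are below) =====
def Claim_equal_check_consecutive_sequence : Prop := ∀ (sequence : List Int) (stand_colors : List (Int × String)) (color : String), Dom_check_consecutive_sequence sequence stand_colors color → Pre_check_consecutive_sequence sequence stand_colors color → Spec_check_consecutive_sequence sequence stand_colors color (check_consecutive_sequence sequence stand_colors color)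

-- ===== LEMMAS AND PROOFS =====

-- takeWhile over an append whose left part is all-true
theorem pv_takeWhile_append_all {p : Int → Bool} (l l' : List Int) (h : l.all p) :
    (l ++ l').takeWhile p = l ++ l'.takeWhile p := by
  induction l with
  | nil => simp
  | cons x xs ih =>
    simp only [List.all_cons, Bool.and_eq_true] at h
    simp [h.1, ih h.2]

-- takeWhile over an append whose left part has a failure
theorem pv_takeWhile_append_not_all {p : Int → Bool} (l l' : List Int) (h : ¬ l.all p) :
    (l ++ l').takeWhile p = l.takeWhile p := by
  induction l with
  | nil => simp at h
  | cons x xs ih =>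
    by_cases hx : p x
    · simp only [List.all_cons, hx, Bool.true_and] at h
      simp [List.takeWhile, hx, ih h]
    · simp [List.takeWhile, hx]

-- characterisation of A's accumulate-and-reset loop: an all-matching list adds its length to the
-- carry, otherwise the result is the length of the trailing matching run
theorem pv_fold_char (p : Int → Bool) (xs : List Int) (c : Int) :
    xs.foldl (fun count stand => if p stand then count + 1 else (0 : Int)) c
      = if xs.all p then c + xs.length else ((xs.reverse.takeWhile p).length : Int) := by
  induction xs generalizing c with
  | nil => simp
  | cons x xs ih =>
    simp only [List.foldl_cons, List.all_cons, List.reverse_cons]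
    by_cases hx : p x
    · rw [if_pos hx, ih]
      by_cases hall : xs.all p
      · simp only [hall, hx, Bool.true_and, if_pos, List.length_cons]
        push_cast; ring
      · have hr : ¬ xs.reverse.all p = true := by simpa [List.all_reverse] using hall
        simp only [hall, hx, Bool.true_and, Bool.false_eq_true, if_false]
        rw [pv_takeWhile_append_not_all _ _ hr]
    · have hx' : p x = false := by simp [hx]
      rw [if_neg hx, ih]
      by_cases hall : xs.all p
      · have hr : xs.reverse.all p := by simpa [List.all_reverse] using hall
        rw [if_pos hall, if_neg (by simp [hx']), pv_takeWhile_append_all _ _ hr]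
        simp [List.takeWhile, hx']
      · have hr : ¬ xs.reverse.all p = true := by simpa [List.all_reverse] using hall
        rw [if_neg hall, if_neg (by simp [hx']), pv_takeWhile_append_not_all _ _ hr]

-- (takeWhile p l).length ≥ n  ↔  l is long enough and its first n elements all satisfy p
theorem pv_takeWhile_len (p : Int → Bool) (l : List Int) (n : Nat) :
    n ≤ (l.takeWhile p).length ↔ n ≤ l.length ∧ (l.take n).all p := by
  induction l generalizing n with
  | nil => cases n <;> simp
  | cons x xs ih =>
    cases n with
    | zero => simp
    | succ m =>
      by_cases hx : p x
      · simp [List.takeWhile, hx, ih m]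
      · simp [List.takeWhile, hx]

-- the closed-form last-three check equals the '≥ 3' test on A's loop value, for any predicate p
theorem pv_core (p : Int → Bool) (xs : List Int) :
    decide (3 ≤ xs.foldl (fun count stand => if p stand then count + 1 else (0 : Int)) 0)
      = (decide ((PySem.List.slice xs (some (-3)) none).length = 3)
          && (PySem.List.slice xs (some (-3)) none).all p) := by
  rw [PySem.List.slice_from_neg_ofNat xs 3 (by omega)]
  have hdrop : xs.drop (xs.length - 3) = (xs.reverse.take 3).reverse := by
    rw [List.take_reverse, List.reverse_reverse]
  rw [pv_fold_char p xs 0, hdrop]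
  by_cases hall : xs.all p
  · have htake : ((xs.reverse.take 3).reverse).all p = true := by
      refine List.all_eq_true.mpr fun y hy => ?_
      exact List.all_eq_true.mp hall y
        (List.mem_reverse.mp (List.mem_of_mem_take (List.mem_reverse.mp hy)))
    rw [if_pos hall, htake]
    simp only [Bool.and_true, List.length_reverse, List.length_take, List.length_reverse,
      decide_eq_decide]
    omega
  · rw [if_neg hall]
    simp only [List.length_reverse, List.length_take, List.length_reverse, List.all_reverse]
    by_cases hq : (xs.reverse.take 3).all p
    · have h1 : 3 ≤ (xs.reverse.takeWhile p).length ↔ 3 ≤ xs.length := by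
        rw [pv_takeWhile_len]; simp [hq]
      rw [hq]
      simp only [Bool.and_true, decide_eq_decide]
      constructor
      · intro h; have : 3 ≤ (xs.reverse.takeWhile p).length := by exact_mod_cast h
        omega
      · intro h; have : 3 ≤ (xs.reverse.takeWhile p).length := h1.mpr (by omega)
        exact_mod_cast this
    · have h2 : ¬ 3 ≤ (xs.reverse.takeWhile p).length := fun h =>
        hq ((pv_takeWhile_len p xs.reverse 3).mp h).2
      have h2' : ¬ (3 : Int) ≤ ((xs.reverse.takeWhile p).length : Int) := by exact_mod_cast h2
      simp [hq, h2']

theorem pv_main (sequence : List Int) (stand_colors : List (Int × String)) (color : String) :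
    check_consecutive_sequence sequence stand_colors color
      = check_consecutive_sequence_alt sequence stand_colors color := by
  unfold check_consecutive_sequence check_consecutive_sequence_alt
  exact pv_core (fun s => stand_colors.lookup s == some color) sequence

-- ===== VERDICT (by name: the statement is the Claim_ definition above) =====
theorem check_consecutive_sequence_spec : Claim_equal_check_consecutive_sequence := by
  intro sequence stand_colors color _ _
  unfold Spec_check_consecutive_sequence
  exact pv_main sequence stand_colors color
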